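-- pv_equiv track=rewrite | github.com/Caroline-menard/amazon_review_classifier_and_Dashboard | Utils.py | track_trigger
-- ===== SOURCE A (Python) =====
-- import string
--
-- to_replace = {
--     "break out":"breakout",
--     "brokes out":"breakout",
--     "breaks out":"breakout",
--     "broke out": "breakout",
--     "breaking out": "breakout",
--     "pimples":"breakout",
--     "pimple":"breakout",
--     " no ":" not ",
--     "$":"dollar "
--     }
--
-- def track_trigger(text, list_expr):
--     text = text.lower()
--     text = text.translate(str.maketrans({p: ' ' for p in string.punctuation}))
--     for u, v in to_replace.items():
--         text = text.replace(u, v)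
--     # split the text
--     tokens = text.split()
--     total= sum(1 for token in tokens if token in list_expr)
--     for exp in list_expr: #test multi word expression
--         if len(exp.split(" "))>1 and exp in text:
--             total+=1
--     # Count the number of words in the list
--     return total
-- ===== SOURCE B (Python) =====
-- import string
-- from collections import Counter
--
-- to_replace = {
--     "break out":"breakout",
--     "brokes out":"breakout",
--     "breaks out":"breakout",
--     "broke out": "breakout",
--     "breaking out": "breakout",
--     "pimples":"breakout",
--     "pimple":"breakout",
--     " no ":" not ",
--     "$":"dollar "
--     }
--
-- def _apply_replaces(items, t):
--     # sequential replacement, written as recursion over the (u, v) pairs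
--     if not items:
--         return t
--     (u, v), rest = items[0], items[1:]
--     return _apply_replaces(rest, t.replace(u, v))
--
-- def track_trigger(text, list_expr):
--     # normalize in one character pass: punctuation -> ' ', everything else lowered
--     t = ''.join(' ' if ch in string.punctuation else ch.lower() for ch in text)
--     t = _apply_replaces(list(to_replace.items()), t)
--     # tally the tokens once, then one table lookup per distinct expression
--     counts = Counter(t.split())
--     total = sum(counts[e] for e in set(list_expr))
--     # multi-word expressions: substring hits, counted with duplicates kept
--     return total + len([e for e in list_expr if len(e.split(" ")) > 1 and e in t])
-- ===== Notes on version B (the rewrite author's own statement) =====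
-- stated objective: alternative
-- what changed: B fuses lowercasing and punctuation removal into one character pass, tallies tokens once into a Counter and sums one lookup per distinct expression instead of A's scan of list_expr for every token, and counts the multi-word substring hits by filtering list_expr rather than an accumulator loop.
import Mathlib
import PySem

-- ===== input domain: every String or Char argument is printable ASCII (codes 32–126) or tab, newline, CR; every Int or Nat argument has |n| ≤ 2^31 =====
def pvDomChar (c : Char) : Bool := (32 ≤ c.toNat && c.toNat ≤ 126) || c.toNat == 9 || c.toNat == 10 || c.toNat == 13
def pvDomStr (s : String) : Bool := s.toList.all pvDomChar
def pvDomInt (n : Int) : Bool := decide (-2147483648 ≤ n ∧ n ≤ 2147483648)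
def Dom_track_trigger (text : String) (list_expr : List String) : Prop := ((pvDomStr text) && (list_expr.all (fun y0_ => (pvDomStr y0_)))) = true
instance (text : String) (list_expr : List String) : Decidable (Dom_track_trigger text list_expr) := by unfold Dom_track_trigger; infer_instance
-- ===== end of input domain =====

-- B normalizes in one fused character pass, tallies the tokens once into a Counter and
-- sums one lookup per distinct expression, and counts multi-word substring hits by
-- filter-and-length instead of A's per-token membership scan and accumulator loop
-- (objective: alternative).

-- ===== PORT A =====
-- string.punctuation
def pvPunct : List Char :=
  ['!', '"', '#', '$', '%', '&', '\'', '(', ')', '*', '+', ',', '-', '.', '/',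
   ':', ';', '<', '=', '>', '?', '@', '[', '\\', ']', '^', '_', '`', '{', '|', '}', '~']

-- the module-level to_replace dict, in insertion order
def pvToReplace : List (String × String) :=
  [("break out", "breakout"), ("brokes out", "breakout"), ("breaks out", "breakout"),
   ("broke out", "breakout"), ("breaking out", "breakout"), ("pimples", "breakout"),
   ("pimple", "breakout"), (" no ", " not "), ("$", "dollar ")]

def track_trigger (text : String) (list_expr : List String) : Int :=
  let t1 := PySem.Str.lower text
  -- translate with a char→' ' table over string.punctuation is a per-character map
  let t2 := String.ofList (t1.toList.map (fun c => if c ∈ pvPunct then ' ' else c))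
  let t := pvToReplace.foldl (fun acc uv => PySem.Str.replace acc uv.1 uv.2) t2
  let tokens := PySem.Str.split₀ t
  let total : Int := (tokens.map (fun token => if token ∈ list_expr then (1 : Int) else 0)).sum
  list_expr.foldl (fun total exp =>
    if 1 < ((PySem.Str.split? exp " ").getD []).length ∧ PySem.Str.isIn exp t = true
    then total + 1 else total) total

-- ===== PORT B =====
-- Source B's _apply_replaces: recursion over the (u, v) pairs
def pvApplyReplaces : List (String × String) → String → String
  | [], t => t
  | (u, v) :: rest, t => pvApplyReplaces rest (PySem.Str.replace t u v)

def track_trigger_alt (text : String) (list_expr : List String) : Int :=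
  let base := String.ofList (text.toList.map
    (fun ch => if ch ∈ pvPunct then ' ' else PySem.Chars.lowerChar ch))
  let t := pvApplyReplaces pvToReplace base
  let counts := PySem.Dict.counter (PySem.Str.split₀ t)
  let total : Int := ((PySem.Set.ofList list_expr).map (fun e => counts.getD e 0)).sum
  total + ((list_expr.filter (fun e =>
      decide (1 < ((PySem.Str.split? e " ").getD []).length) && PySem.Str.isIn e t)).length : Int)

-- ===== PRECONDITION & SPEC =====
def Spec_track_trigger (text : String) (list_expr : List String) (out : Int) : Prop := out = track_trigger_alt text list_expr
instance (text : String) (list_expr : List String) (out : Int) : Decidable (Spec_track_trigger text list_expr out) := by unfold Spec_track_trigger; infer_instance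

-- ===== CLAIM (what is proved, stated in full; the proofs are below) =====
def Claim_equal_track_trigger : Prop := ∀ (text : String) (list_expr : List String), Dom_track_trigger text list_expr → Spec_track_trigger text list_expr (track_trigger text list_expr)

-- ===== LEMMAS AND PROOFS =====

-- punctuation characters: neither lowercase-letter codes nor uppercase letters
theorem pv_punct_props :
    pvPunct.all (fun c => !(97 ≤ c.toNat && c.toNat ≤ 122) && !(PySem.Chars.isupper c)) = true := by
  decide

-- lowering then replacing punctuation equals B's fused per-character step
theorem pv_char_step (c : Char) :
    (if PySem.Chars.lowerChar c ∈ pvPunct then ' ' else PySem.Chars.lowerChar c)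
      = (if c ∈ pvPunct then ' ' else PySem.Chars.lowerChar c) := by
  by_cases hp : c ∈ pvPunct
  · have h := (List.all_eq_true.mp pv_punct_props) c hp
    have hu : PySem.Chars.isupper c = false := by
      rcases Bool.and_eq_true_iff.mp h with ⟨-, h2⟩
      simpa using h2
    have hc : PySem.Chars.lowerChar c = c := by simp [PySem.Chars.lowerChar, hu]
    simp [hc, hp]
  · by_cases hu : PySem.Chars.isupper c = true
    · have h1 : 'A' ≤ c ∧ c ≤ 'Z' := by
        simpa [PySem.Chars.isupper] using hu
      have h65 : 65 ≤ c.toNat := h1.1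
      have h90 : c.toNat ≤ 90 := h1.2
      have hval : (Char.ofNat (c.toNat + 32)).toNat = c.toNat + 32 := by
        have hlt : c.toNat + 32 < 55296 := by omega
        unfold Char.ofNat
        simp [Nat.isValidChar, hlt]
      have hrange : 97 ≤ (PySem.Chars.lowerChar c).toNat ∧ (PySem.Chars.lowerChar c).toNat ≤ 122 := by
        constructor <;> · simp [PySem.Chars.lowerChar, hu, hval]; omega
      have hnot : PySem.Chars.lowerChar c ∉ pvPunct := by
        intro hm
        have h := (List.all_eq_true.mp pv_punct_props) _ hm
        rcases Bool.and_eq_true_iff.mp h with ⟨h1', -⟩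
        have h1'' : (PySem.Chars.lowerChar c).toNat < 97 ∨ 122 < (PySem.Chars.lowerChar c).toNat := by
          simpa using h1'
        omega
      simp [hnot, hp]
    · have hc : PySem.Chars.lowerChar c = c := by
        simp [PySem.Chars.lowerChar, hu]
      simp [hc, hp]

-- the two normalized base strings coincide
theorem pv_base_eq (text : String) :
    String.ofList ((PySem.Str.lower text).toList.map (fun c => if c ∈ pvPunct then ' ' else c))
      = String.ofList (text.toList.map (fun ch => if ch ∈ pvPunct then ' ' else PySem.Chars.lowerChar ch)) := by
  apply congrArg
  rw [PySem.Str.toList_lower, PySem.Chars.lower, List.map_map]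
  apply List.map_congr_left
  intro c _
  exact pv_char_step c

-- B's recursive replacement helper is A's left fold
theorem pv_applyReplaces_eq_foldl (l : List (String × String)) (t : String) :
    pvApplyReplaces l t = l.foldl (fun acc uv => PySem.Str.replace acc uv.1 uv.2) t := by
  induction l generalizing t with
  | nil => rfl
  | cons uv rest ih => cases uv; simp [pvApplyReplaces, ih]

-- double counting: for a duplicate-free S, summing the multiplicity of each element of S in
-- `tokens` equals counting the tokens that lie in S
theorem pv_sum_count_eq (tokens S : List String) (hS : S.Nodup) :
    (S.map (fun w => ((tokens.count w : Nat) : Int))).sum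
      = (tokens.map (fun tok => if tok ∈ S then (1 : Int) else 0)).sum := by
  induction tokens with
  | nil => simp
  | cons t ts ih =>
    have hstep : (S.map (fun w => ((List.count w (t :: ts) : Nat) : Int))).sum
        = (S.map (fun w => ((ts.count w : Nat) : Int))).sum
          + (S.map (fun w => if w = t then (1 : Int) else 0)).sum := by
      rw [← List.sum_map_add]
      apply congrArg
      apply List.map_congr_left
      intro w _
      rw [List.count_cons]
      by_cases h : w = t
      · simp [h]
      · have hb : (t == w) = false := by simp; exact fun e => h e.symm
        simp [hb, h]
    have hind : (S.map (fun w => if w = t then (1 : Int) else 0)).sum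
        = if t ∈ S then (1 : Int) else 0 := by
      have h1 : (S.map (fun w => if (w == t) = true then (1 : Int) else 0)).sum
          = ((S.countP (fun w => w == t) : Nat) : Int) :=
        PySem.List.sum_map_ite_one_zero (fun w => w == t) S
      have h2 : S.countP (fun w => w == t) = S.count t := by
        simp [List.count]
      by_cases ht : t ∈ S
      · have := List.count_eq_one_of_mem hS ht
        simpa [h2, this, ht] using h1
      · have : S.count t = 0 := List.count_eq_zero_of_not_mem ht
        simpa [h2, this, ht] using h1
    rw [hstep, ih, hind]
    simp [List.map_cons, add_comm]

-- the Counter-lookup sum over the distinct expressions equals A's token scan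
theorem pv_totals_eq (tokens list_expr : List String) :
    ((PySem.Set.ofList list_expr).map
        (fun w => (PySem.Dict.counter tokens).getD w 0)).sum
      = (tokens.map (fun token => if token ∈ list_expr then (1 : Int) else 0)).sum := by
  have h1 : ((PySem.Set.ofList list_expr).map (fun w => (PySem.Dict.counter tokens).getD w 0)).sum
      = ((PySem.Set.ofList list_expr).map (fun w => ((tokens.count w : Nat) : Int))).sum := by
    apply congrArg
    apply List.map_congr_left
    intro w _
    exact PySem.Dict.getD_counter tokens w
  rw [h1, pv_sum_count_eq tokens _ (PySem.Set.nodup_ofList list_expr)]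
  apply congrArg
  apply List.map_congr_left
  intro tok _
  simp [PySem.Set.mem_ofList]

-- an accumulator loop that conditionally adds one is the length of the filtered list
theorem pv_foldl_if_count {α : Type} (p : α → Prop) [DecidablePred p] (l : List α) (n : Int) :
    l.foldl (fun a e => if p e then a + 1 else a) n
      = n + ((l.filter (fun e => decide (p e))).length : Int) := by
  induction l generalizing n with
  | nil => simp
  | cons x xs ih =>
    by_cases h : p x
    · simp only [List.foldl, List.filter_cons, h, decide_true, ih, if_true,
        List.length_cons]
      push_cast
      omega
    · simp only [List.foldl, List.filter_cons, h, decide_false, ih]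
      simp

-- ===== VERDICT (by name: the statement is the Claim_ definition above) =====
theorem track_trigger_spec : Claim_equal_track_trigger := by
  intro text list_expr _
  unfold Spec_track_trigger track_trigger track_trigger_alt
  dsimp only
  rw [pv_applyReplaces_eq_foldl, pv_base_eq, pv_totals_eq,
      pv_foldl_if_count (fun exp => 1 < ((PySem.Str.split? exp " ").getD []).length ∧
        PySem.Str.isIn exp (List.foldl (fun acc uv => PySem.Str.replace acc uv.1 uv.2)
          (String.ofList (text.toList.map (fun ch => if ch ∈ pvPunct then ' ' else PySem.Chars.lowerChar ch)))
          pvToReplace) = true)]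
  congr 1
  simp
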